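-- pv_equiv track=rewrite | github.com/RenoirTan/AdventOfCode2021 | days/15/code/p2.py | extend_matrix
-- ===== SOURCE A (Python) =====
-- import typing as t
--
-- def wrap(value: int, limit: int, lowest: int) -> int:
--     return lowest + (value % limit) - 1 if value > limit else value
--
-- def clone_2d(original: t.List[t.List[int]]) -> t.List[t.List[int]]:
--     result = []
--     for row in original:
--         result.append(row.copy())
--     return result
--
-- def extend_matrix(original: t.List[t.List[int]], nx: int, ny: int, limit: int, lowest: int) -> t.List[t.List[int]]:
--     olen_y = len(original)
--     olen_x = len(original[0])
--     result = clone_2d(original)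
--     for mx in range(nx):
--         for my in range(ny):
--             if my + mx == 0:
--                 continue
--             clone = clone_2d(original)
--             for y in range(olen_y):
--                 for x in range(olen_x):
--                     clone[y][x] = wrap(clone[y][x]+my+mx, limit, lowest)
--             if mx == 0:
--                 for _ in range(olen_y):
--                     result.append([])
--             for y in range(olen_y):
--                 sy = y + my*olen_y
--                 result[sy].extend(clone[y])
--     return result
-- ===== SOURCE B (Python) =====
-- def wrap(value, limit, lowest):
--     return lowest + (value % limit) - 1 if value > limit else value
--
-- def extend_matrix(original, nx, ny, limit, lowest):
--     if nx <= 0 or ny <= 0: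
--         return [row.copy() for row in original]
--     # Only nx+ny-1 distinct tiles exist (a tile depends only on the shift s = mx+my):
--     # compute each shifted tile once and assemble the output by table lookup.
--     tiles = []
--     for s in range(nx + ny - 1):
--         if s == 0:
--             tiles.append([row.copy() for row in original])
--         else:
--             tiles.append([[wrap(v + s, limit, lowest) for v in row] for row in original])
--     result = []
--     for my in range(ny):
--         for y in range(len(original)):
--             row = []
--             for mx in range(nx):
--                 row += tiles[mx + my][y]
--             result.append(row)
--     return result
-- ===== Notes on version B (the rewrite author's own statement) =====
-- stated objective: alternative
-- what changed: B memoizes: since a tile depends only on the diagonal shift s = mx+my, it precomputes the nx+ny-1 distinct shifted tiles once in a table and assembles the output by table lookup, instead of A's per-(mx,my) clone_2d + in-place wrap loop + append/extend row surgery recomputing every tile.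
import Mathlib
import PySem

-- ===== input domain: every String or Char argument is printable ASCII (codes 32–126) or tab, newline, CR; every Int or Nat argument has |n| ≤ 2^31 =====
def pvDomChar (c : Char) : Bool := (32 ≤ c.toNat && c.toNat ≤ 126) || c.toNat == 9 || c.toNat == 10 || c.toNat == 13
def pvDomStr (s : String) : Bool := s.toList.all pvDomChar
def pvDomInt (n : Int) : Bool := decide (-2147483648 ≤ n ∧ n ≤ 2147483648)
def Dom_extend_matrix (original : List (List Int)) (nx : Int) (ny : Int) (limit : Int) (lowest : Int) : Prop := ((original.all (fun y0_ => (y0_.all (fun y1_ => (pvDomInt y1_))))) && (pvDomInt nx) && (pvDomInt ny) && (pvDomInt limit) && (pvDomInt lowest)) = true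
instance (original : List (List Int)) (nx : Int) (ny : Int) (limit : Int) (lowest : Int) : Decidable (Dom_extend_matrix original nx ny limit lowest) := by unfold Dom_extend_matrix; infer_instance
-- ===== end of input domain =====

-- B memoizes the nx+ny-1 distinct shifted tiles (one per diagonal shift mx+my) in a table
-- built once, then assembles the output by table lookup, instead of A's per-(mx,my)
-- clone + in-place wrap loop + append/extend row surgery; objective: alternative.

-- ===== PORT A =====
-- helper `wrap` of the Python module (shared verbatim by A and B, as in the Python sources)
def wrap (value : Int) (limit : Int) (lowest : Int) : Int :=
  if value > limit then lowest + PySem.Int.mod value limit - 1 else value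

def clone_2d (original : List (List Int)) : List (List Int) :=
  original.foldl (fun result row => result ++ [row]) []

-- literal transliteration of A.  On Pre_ inputs every index that Python touches is
-- non-negative and in range, so `List.modify`/`List.set`/`getD`/`.toNat` below are exact
-- renderings of the Python subscripts (the loop variables come from range(...) and are ≥ 0).
def extend_matrix (original : List (List Int)) (nx : Int) (ny : Int) (limit : Int) (lowest : Int) : List (List Int) :=
  let olen_y := original.length
  let olen_x := ((PySem.List.pyGet? original 0).getD []).length  -- len(original[0]); IndexError on [] is outside Pre_
  (PySem.List.pyRange 0 nx 1).foldl (fun result mx =>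
    (PySem.List.pyRange 0 ny 1).foldl (fun result my =>
      if my + mx = 0 then result
      else
        let clone := (List.range olen_y).foldl (fun clone y =>
          (List.range olen_x).foldl (fun clone x =>
            clone.modify y (fun row => row.set x (wrap (row.getD x 0 + my + mx) limit lowest))) clone)
          (clone_2d original)
        let result := if mx = 0 then
            (List.range olen_y).foldl (fun result _ => result ++ [([] : List Int)]) result
          else result
        (List.range olen_y).foldl (fun result y =>
          result.modify (y + my.toNat * olen_y) (fun row => row ++ clone.getD y [])) result)
      result)
    (clone_2d original)

-- ===== PORT B =====
-- transliteration of Source B.  In the tiling branch the guard gives nx ≥ 1 and ny ≥ 1, so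
-- `range(k)` is ported as `List.range k.toNat` (exact for k ≥ 0); the table index mx+my is
-- always < nx+ny-1 = tiles.length there, so `getD` is an exact rendering of tiles[mx+my][y].
def extend_matrix_alt (original : List (List Int)) (nx : Int) (ny : Int) (limit : Int) (lowest : Int) : List (List Int) :=
  if nx ≤ 0 ∨ ny ≤ 0 then original.foldl (fun r row => r ++ [row]) []
  else
    let tiles := (List.range (nx + ny - 1).toNat).foldl
      (fun tiles (s : Nat) =>
        tiles ++ [if s = 0 then original.map (fun row => row)
                  else original.map (fun row => row.map (fun v => wrap (v + (s : Int)) limit lowest))])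
      []
    (List.range ny.toNat).foldl (fun result my =>
      (List.range original.length).foldl (fun result y =>
        result ++ [(List.range nx.toNat).foldl
          (fun row mx => row ++ (tiles.getD (mx + my) []).getD y []) []]) result) []

-- ===== PRECONDITION & SPEC =====
-- Pre_ excludes exactly the inputs on which A raises — the empty matrix (IndexError on
-- original[0]), and, when real tiling happens (nx ≥ 1 and ny ≥ 1): matrices some of whose
-- rows are shorter than the first row (IndexError), and limit = 0 when some shifted cell is
-- positive (ZeroDivisionError in wrap) — plus ragged matrices whose later rows are LONGER
-- than the first: there A returns a value whose overhanging cells are accidentally left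
-- unwrapped (an artefact of indexing by len(original[0])); ragged input is outside the
-- natural domain of this matrix-tiling function, so Pre_ restricts to rectangular matrices.
def Pre_extend_matrix (original : List (List Int)) (nx : Int) (ny : Int) (limit : Int) (lowest : Int) : Prop :=
  original ≠ [] ∧
    (nx ≤ 0 ∨ ny ≤ 0 ∨
      ((∀ r ∈ original, r.length = (original.headD []).length) ∧
        (limit ≠ 0 ∨ nx + ny ≤ 2 ∨ ∀ r ∈ original, ∀ v ∈ r, v + nx + ny ≤ 2)))

instance (original : List (List Int)) (nx : Int) (ny : Int) (limit : Int) (lowest : Int) : Decidable (Pre_extend_matrix original nx ny limit lowest) := by unfold Pre_extend_matrix; infer_instance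

def pvWitness_extend_matrix : List (List Int) × Int × Int × Int × Int := ([[1, 2], [3, 4]], 2, 2, 9, 1)

def Spec_extend_matrix (original : List (List Int)) (nx : Int) (ny : Int) (limit : Int) (lowest : Int) (out : List (List Int)) : Prop := out = extend_matrix_alt original nx ny limit lowest
instance (original : List (List Int)) (nx : Int) (ny : Int) (limit : Int) (lowest : Int) (out : List (List Int)) : Decidable (Spec_extend_matrix original nx ny limit lowest out) := by unfold Spec_extend_matrix; infer_instance

-- ===== CLAIM (what is proved, stated in full; the proofs are below) =====
def Claim_equal_extend_matrix : Prop := ∀ (original : List (List Int)) (nx : Int) (ny : Int) (limit : Int) (lowest : Int), Dom_extend_matrix original nx ny limit lowest → Pre_extend_matrix original nx ny limit lowest → Spec_extend_matrix original nx ny limit lowest (extend_matrix original nx ny limit lowest)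

-- ===== LEMMAS AND PROOFS =====

-- proof-only helpers: the closed form both programs compute in the tiling case
def blockRow (o : List (List Int)) (limit lowest : Int) (my mx y : Nat) : List Int :=
  if my = 0 ∧ mx = 0 then o.getD y []
  else (o.getD y []).map (fun v => wrap (v + (my : Int) + (mx : Int)) limit lowest)

def blk (o : List (List Int)) (limit lowest : Int) (m my : Nat) : List (List Int) :=
  (List.range o.length).map (fun y =>
    (List.range m).flatMap (fun mx => blockRow o limit lowest my mx y))

def build (o : List (List Int)) (limit lowest : Int) (m n : Nat) : List (List Int) :=
  (List.range n).flatMap (blk o limit lowest m)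

-- the step function of A's my-loop (one tile column pass), as the port computes it
def stepA (o : List (List Int)) (limit lowest : Int) (mx : Nat)
    (result : List (List Int)) (my : Nat) : List (List Int) :=
  if (my : Int) + (mx : Int) = 0 then result
  else
    let clone := List.foldl (fun clone y =>
      List.foldl (fun clone x =>
        clone.modify y fun row => row.set x (wrap (row.getD x 0 + (my : Int) + (mx : Int)) limit lowest))
        clone (List.range (o.headD []).length)) (clone_2d o) (List.range o.length)
    let result := if (mx : Int) = 0 then
        List.foldl (fun result _ => result ++ [[]]) result (List.range o.length)
      else result
    List.foldl (fun result y =>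
      result.modify (y + ((my : Int)).toNat * o.length) fun row => row ++ clone.getD y [])
      result (List.range o.length)

theorem foldl_snoc {α : Type} : ∀ (o acc : List α), o.foldl (fun r x => r ++ [x]) acc = acc ++ o
  | [], acc => by simp
  | a :: t, acc => by simp [List.foldl_cons, foldl_snoc t (acc ++ [a])]

theorem foldl_snoc_f {α β : Type} (f : α → β) : ∀ (l : List α) (acc : List β),
    l.foldl (fun r x => r ++ [f x]) acc = acc ++ l.map f
  | [], acc => by simp
  | a :: t, acc => by simp [List.foldl_cons, foldl_snoc_f f t (acc ++ [f a])]

theorem foldl_app_f {α β : Type} (f : α → List β) : ∀ (l : List α) (acc : List β),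
    l.foldl (fun r x => r ++ f x) acc = acc ++ l.flatMap f
  | [], acc => by simp
  | a :: t, acc => by simp [List.foldl_cons, foldl_app_f f t (acc ++ f a)]

theorem flatMap_congr_mem {α β : Type} (l : List α) (f g : α → List β)
    (h : ∀ a ∈ l, f a = g a) : l.flatMap f = l.flatMap g := by
  simp only [List.flatMap_def]
  rw [List.map_congr_left h]

theorem clone_2d_eq (o : List (List Int)) : clone_2d o = o := by
  simpa [clone_2d] using foldl_snoc o []

theorem modify_modify_same {α : Type} (l : List α) (n : Nat) (f g : α → α) :
    (l.modify n f).modify n g = l.modify n (fun a => g (f a)) := by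
  apply List.ext_getElem?
  intro j
  simp only [List.getElem?_modify, Option.map_eq_map, Option.map_map]
  congr 1
  funext a
  by_cases hn : n = j <;> simp [hn]

theorem foldl_modify_same {α β : Type} (l : List β) (c : List α) (n : Nat) (h : α → β → α) :
    l.foldl (fun c x => c.modify n (fun a => h a x)) c = c.modify n (fun a => l.foldl h a) := by
  induction l generalizing c with
  | nil =>
    apply Eq.symm
    apply List.ext_getElem?
    intro j
    simp only [List.getElem?_modify, List.foldl_nil, Option.map_eq_map]
    simp
  | cons b l ih =>
    simp only [List.foldl_cons]
    rw [ih, modify_modify_same]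

theorem setmap_aux : ∀ (r P : List Int) (f : Int → Int),
    (List.range r.length).foldl
      (fun s x => s.set (P.length + x) (f (s.getD (P.length + x) 0))) (P ++ r)
      = P ++ r.map f
  | [], P, f => by simp
  | a :: r', P, f => by
      rw [List.length_cons, List.range_succ_eq_map]
      simp only [List.foldl_cons, List.foldl_map]
      have h1 : (P ++ a :: r').getD (P.length + 0) 0 = a := by
        simp [List.getD_append_right]
      have h2 : (P ++ a :: r').set (P.length + 0) (f a) = (P ++ [f a]) ++ r' := by
        simp [List.set_append]
      rw [h1, h2]
      have hfun : (fun (s : List Int) (x : Nat) =>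
            s.set (P.length + x.succ) (f (s.getD (P.length + x.succ) 0)))
          = (fun (s : List Int) (x : Nat) =>
            s.set ((P ++ [f a]).length + x) (f (s.getD ((P ++ [f a]).length + x) 0))) := by
        funext s x
        have : P.length + x.succ = (P ++ [f a]).length + x := by simp; omega
        rw [this]
      rw [hfun, setmap_aux r' (P ++ [f a]) f]
      simp

theorem modify_append_cons {α : Type} (P : List α) (a : α) (T : List α) (h : α → α) :
    (P ++ a :: T).modify P.length h = P ++ h a :: T := by
  rw [List.modify_eq_take_cons_drop (by simp)]
  simp [List.getElem_append_right, List.drop_append]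

theorem modifymap_aux {α : Type} : ∀ (M P : List α) (h : α → α),
    (List.range M.length).foldl (fun c y => c.modify (P.length + y) h) (P ++ M)
      = P ++ M.map h
  | [], P, h => by simp
  | a :: M', P, h => by
      rw [List.length_cons, List.range_succ_eq_map]
      simp only [List.foldl_cons, List.foldl_map]
      have h1 : (P ++ a :: M').modify (P.length + 0) h = (P ++ [h a]) ++ M' := by
        rw [Nat.add_zero, modify_append_cons]; simp
      rw [h1]
      have hfun : (fun (c : List α) (y : Nat) => c.modify (P.length + y.succ) h)
          = (fun (c : List α) (y : Nat) => c.modify ((P ++ [h a]).length + y) h) := by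
        funext c y
        have : P.length + y.succ = (P ++ [h a]).length + y := by simp; omega
        rw [this]
      rw [hfun, modifymap_aux M' (P ++ [h a]) h]
      simp

theorem extend_block : ∀ (M P S : List (List Int)) (g : Nat → List Int),
    (List.range M.length).foldl
      (fun res y => res.modify (y + P.length) (fun row => row ++ g y)) (P ++ (M ++ S))
      = P ++ ((List.range M.length).map (fun y => M.getD y [] ++ g y) ++ S)
  | [], P, S, g => by simp
  | r :: M', P, S, g => by
      rw [List.length_cons, List.range_succ_eq_map]
      simp only [List.foldl_cons, List.foldl_map]
      have h1 : (P ++ (r :: M' ++ S)).modify (0 + P.length) (fun row => row ++ g 0)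
          = (P ++ [r ++ g 0]) ++ (M' ++ S) := by
        rw [Nat.zero_add]
        have : (P ++ (r :: M' ++ S)) = P ++ r :: (M' ++ S) := by simp
        rw [this, modify_append_cons]; simp
      rw [h1]
      have hfun : (fun (res : List (List Int)) (y : Nat) =>
            res.modify (y.succ + P.length) (fun row => row ++ g y.succ))
          = (fun (res : List (List Int)) (y : Nat) =>
            res.modify (y + (P ++ [r ++ g 0]).length) (fun row => row ++ (fun z => g (z + 1)) y)) := by
        funext res y
        have : y.succ + P.length = y + (P ++ [r ++ g 0]).length := by simp; omega
        rw [this]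
      rw [hfun, extend_block M' (P ++ [r ++ g 0]) S (fun z => g (z + 1))]
      simp

theorem append_empties : ∀ (n : Nat) (res : List (List Int)),
    (List.range n).foldl (fun res _ => res ++ [([] : List Int)]) res
      = res ++ List.replicate n []
  | 0, res => by simp
  | n + 1, res => by
      rw [List.range_succ, List.foldl_append, append_empties n res]
      simp [List.replicate_succ']

theorem map_range_getD {α : Type} : ∀ (M : List α) (d : α),
    (List.range M.length).map (fun y => M.getD y d) = M
  | [], _ => by simp
  | a :: M', d => by
      rw [List.length_cons, List.range_succ_eq_map]
      simp only [List.map_cons, List.map_map]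
      rw [show ((fun y => (a :: M').getD y d) ∘ Nat.succ) = (fun y => M'.getD y d) from rfl,
        map_range_getD M' d]
      simp

theorem getD_map_nil (o : List (List Int)) (g : List Int → List Int) (y : Nat) (hy : y < o.length) :
    (o.map g).getD y [] = g (o.getD y []) := by
  rw [List.getD_eq_getElem _ _ (by simpa using hy), List.getD_eq_getElem _ _ hy,
    List.getElem_map]

theorem flat_len {α : Type} : ∀ (n : Nat) (L : Nat) (blk : Nat → List α), (∀ my, (blk my).length = L) →
    ((List.range n).flatMap blk).length = n * L
  | 0, L, blk, h => by simp
  | n + 1, L, blk, h => by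
      rw [List.range_succ]
      simp [flat_len n L blk h, h, Nat.succ_mul]

theorem foldl_id {α β : Type} : ∀ (l : List β) (c : α), l.foldl (fun r _ => r) c = c
  | [], c => rfl
  | _ :: l, c => foldl_id l c

theorem extend_block' (L : Nat) (M P S : List (List Int)) (g : Nat → List Int) (hM : M.length = L) :
    (List.range L).foldl
      (fun res y => res.modify (y + P.length) (fun row => row ++ g y)) (P ++ (M ++ S))
      = P ++ ((List.range L).map (fun y => M.getD y [] ++ g y) ++ S) := by
  subst hM
  exact extend_block M P S g

theorem getD_rep (n y : Nat) : (List.replicate n ([] : List Int)).getD y [] = [] := by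
  rw [List.getD_eq_getElem?_getD]
  simp [List.getElem?_replicate]
  split <;> simp

theorem blk_len (o : List (List Int)) (limit lowest : Int) (m my : Nat) :
    (blk o limit lowest m my).length = o.length := by
  simp [blk]

theorem build_len (o : List (List Int)) (limit lowest : Int) (m n : Nat) :
    (build o limit lowest m n).length = n * o.length := by
  unfold build
  exact flat_len n o.length (blk o limit lowest m) (fun my => blk_len o limit lowest m my)

theorem build_succ (o : List (List Int)) (limit lowest : Int) (m n : Nat) :
    build o limit lowest m (n + 1) = build o limit lowest m n ++ blk o limit lowest m n := by
  unfold build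
  rw [List.range_succ]
  simp

theorem blk_one_zero (o : List (List Int)) (limit lowest : Int) : blk o limit lowest 1 0 = o := by
  unfold blk blockRow
  simp only [List.range_one, List.flatMap_cons, List.flatMap_nil, List.append_nil, and_self,
    if_pos rfl]
  exact map_range_getD o []

theorem pyGet0 (o : List (List Int)) (h : o ≠ []) : (PySem.List.pyGet? o 0).getD [] = o.headD [] := by
  cases o with
  | nil => simp at h
  | cons a t => simp [PySem.List.pyGet?, PySem.List.pyIdx?]

theorem pyRange_toNat (nx : Int) (h : 0 ≤ nx) :
    PySem.List.pyRange 0 nx 1 = (List.range nx.toNat).map (fun k => ((k : Nat) : Int)) := by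
  have := PySem.List.pyRange_zero_natCast nx.toNat
  rwa [Int.toNat_of_nonneg h] at this

theorem inner_clone (o : List (List Int)) (limit lowest my mx : Int) (olx : Nat)
    (hrect : ∀ r ∈ o, r.length = olx) :
    List.foldl (fun clone y =>
      List.foldl (fun clone x =>
        clone.modify y fun row => row.set x (wrap (row.getD x 0 + my + mx) limit lowest))
        clone (List.range olx)) (clone_2d o) (List.range o.length)
    = o.map (fun r => r.map (fun v => wrap (v + my + mx) limit lowest)) := by
  rw [clone_2d_eq]
  have h1 : (fun (clone : List (List Int)) (y : Nat) =>
      List.foldl (fun clone x =>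
        clone.modify y fun row => row.set x (wrap (row.getD x 0 + my + mx) limit lowest))
        clone (List.range olx))
      = (fun (clone : List (List Int)) (y : Nat) => clone.modify y
          (fun row => List.foldl
            (fun s x => s.set x (wrap (s.getD x 0 + my + mx) limit lowest)) row (List.range olx))) := by
    funext clone y
    exact foldl_modify_same (List.range olx) clone y _
  rw [h1]
  have h2 := modifymap_aux o ([] : List (List Int)) (fun row => List.foldl
    (fun s x => s.set x (wrap (s.getD x 0 + my + mx) limit lowest)) row (List.range olx))
  simp only [List.length_nil, List.nil_append, Nat.zero_add] at h2
  rw [h2]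
  apply List.map_congr_left
  intro r hr
  rw [← hrect r hr]
  simpa using setmap_aux r ([] : List Int) (fun v => wrap (v + my + mx) limit lowest)

theorem pass0 (o : List (List Int)) (limit lowest : Int) (mx0 : Nat) (hmx0 : mx0 = 0)
    (hrect : ∀ r ∈ o, r.length = (o.headD []).length) :
    ∀ n : Nat, 1 ≤ n →
      List.foldl (stepA o limit lowest mx0) o (List.range n) = build o limit lowest 1 n := by
  subst hmx0
  intro n hn
  induction n with
  | zero => omega
  | succ n ih =>
    by_cases hn1 : n = 0
    · subst hn1
      rw [List.range_one, List.foldl_cons, List.foldl_nil,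
        show stepA o limit lowest 0 o 0 = o by simp [stepA]]
      unfold build
      rw [List.range_one]
      simp [blk_one_zero]
    · have hn' : 1 ≤ n := by omega
      rw [List.range_succ, List.foldl_append, ih hn', List.foldl_cons, List.foldl_nil]
      unfold stepA
      rw [if_neg (show ¬((n : Int) + ((0 : Nat) : Int) = 0) by push_cast; omega)]
      simp only [inner_clone o limit lowest (n : Int) ((0 : Nat) : Int) (o.headD []).length hrect]
      rw [if_pos (show ((0 : Nat) : Int) = 0 by simp)]
      rw [append_empties o.length (build o limit lowest 1 n)]
      simp only [Int.toNat_natCast]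
      have hP : (build o limit lowest 1 n).length = n * o.length := build_len o limit lowest 1 n
      simp only [← hP]
      rw [← List.append_nil (List.replicate o.length ([] : List Int))]
      rw [extend_block' o.length (List.replicate o.length ([] : List Int))
        (build o limit lowest 1 n) []
        (fun y => (List.map (fun r => List.map (fun v => wrap (v + (n : Int) + ((0 : Nat) : Int)) limit lowest) r) o).getD y [])
        (List.length_replicate)]
      simp only [getD_rep, List.nil_append, List.append_nil]
      rw [build_succ]
      congr 1
      unfold blk
      apply List.map_congr_left
      intro y hy
      rw [List.mem_range] at hy
      rw [getD_map_nil o _ y hy]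
      rw [List.range_one]
      simp only [List.flatMap_cons, List.flatMap_nil, List.append_nil]
      unfold blockRow
      rw [if_neg (by omega : ¬(n = 0 ∧ 0 = 0))]

theorem passPos (o : List (List Int)) (limit lowest : Int)
    (hrect : ∀ r ∈ o, r.length = (o.headD []).length) (mx : Nat) (hmx : 1 ≤ mx) :
    ∀ (n : Nat) (S : List (List Int)),
      List.foldl (stepA o limit lowest mx)
        ((List.range n).flatMap (blk o limit lowest mx) ++ S) (List.range n)
      = (List.range n).flatMap (blk o limit lowest (mx + 1)) ++ S := by
  intro n
  induction n with
  | zero => intro S; simp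
  | succ n ih =>
    intro S
    rw [List.range_succ, List.foldl_append, List.flatMap_append, List.flatMap_singleton,
      List.append_assoc, ih (blk o limit lowest mx n ++ S), List.foldl_cons, List.foldl_nil]
    unfold stepA
    rw [if_neg (show ¬((n : Int) + (mx : Int) = 0) by push_cast; omega)]
    simp only [inner_clone o limit lowest (n : Int) (mx : Int) (o.headD []).length hrect]
    rw [if_neg (show ¬((mx : Nat) : Int) = 0 by push_cast; omega)]
    simp only [Int.toNat_natCast]
    have hP : ((List.range n).flatMap (blk o limit lowest (mx + 1))).length = n * o.length :=
      flat_len n o.length (blk o limit lowest (mx + 1)) (fun my => blk_len o limit lowest (mx + 1) my)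
    simp only [← hP]
    rw [extend_block' o.length (blk o limit lowest mx n)
      ((List.range n).flatMap (blk o limit lowest (mx + 1))) S
      (fun y => (List.map (fun r => List.map (fun v => wrap (v + (n : Int) + (mx : Int)) limit lowest) r) o).getD y [])
      (blk_len o limit lowest mx n)]
    rw [List.flatMap_append, List.flatMap_singleton, List.append_assoc]
    congr 1
    congr 1
    unfold blk
    apply List.map_congr_left
    intro y hy
    rw [List.mem_range] at hy
    rw [PySem.List.getD_map_range (fun y => (List.range mx).flatMap
      (fun mxi => blockRow o limit lowest n mxi y)) o.length y [] hy]
    rw [getD_map_nil o _ y hy]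
    rw [List.range_succ, List.flatMap_append, List.flatMap_singleton]
    congr 1
    unfold blockRow
    rw [if_neg (by omega : ¬(n = 0 ∧ mx = 0))]

theorem tiling (o : List (List Int)) (limit lowest : Int)
    (hrect : ∀ r ∈ o, r.length = (o.headD []).length) (NY : Nat) (hNY : 1 ≤ NY) :
    ∀ NX : Nat, 1 ≤ NX →
      List.foldl (fun result mx => List.foldl (stepA o limit lowest mx) result (List.range NY))
        (clone_2d o) (List.range NX)
      = build o limit lowest NX NY := by
  intro NX hNX
  induction NX with
  | zero => omega
  | succ m ih =>
    by_cases hm : m = 0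
    · subst hm
      rw [List.range_one, List.foldl_cons, List.foldl_nil, clone_2d_eq]
      exact pass0 o limit lowest 0 rfl hrect NY hNY
    · have hm' : 1 ≤ m := by omega
      rw [List.range_succ, List.foldl_append, ih hm', List.foldl_cons, List.foldl_nil]
      have h := passPos o limit lowest hrect m hm' NY []
      rw [List.append_nil, List.append_nil] at h
      unfold build
      exact h

-- ===== B side: the tile table equals `build` =====

-- the tile of shift s, as Source B stores it in the table
def tileFn (o : List (List Int)) (limit lowest : Int) (s : Nat) : List (List Int) :=
  if s = 0 then o.map (fun row => row)
  else o.map (fun row => row.map (fun v => wrap (v + (s : Int)) limit lowest))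

theorem tiles_eq (o : List (List Int)) (limit lowest : Int) (N : Nat) :
    (List.range N).foldl
      (fun tiles (s : Nat) => tiles ++ [if s = 0 then o.map (fun row => row)
        else o.map (fun row => row.map (fun v => wrap (v + (s : Int)) limit lowest))])
      ([] : List (List (List Int)))
    = (List.range N).map (tileFn o limit lowest) := by
  have h : (fun (tiles : List (List (List Int))) (s : Nat) =>
      tiles ++ [if s = 0 then o.map (fun row => row)
        else o.map (fun row => row.map (fun v => wrap (v + (s : Int)) limit lowest))])
      = (fun tiles s => tiles ++ [tileFn o limit lowest s]) := rfl
  rw [h, foldl_snoc_f (tileFn o limit lowest) (List.range N) []]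
  simp

theorem tile_row (o : List (List Int)) (limit lowest : Int) (my mx y : Nat)
    (hy : y < o.length) :
    (tileFn o limit lowest (mx + my)).getD y [] = blockRow o limit lowest my mx y := by
  unfold tileFn blockRow
  by_cases hz : mx + my = 0
  · rw [if_pos hz, if_pos (by omega : my = 0 ∧ mx = 0)]
    simp
  · rw [if_neg hz, if_neg (by omega : ¬(my = 0 ∧ mx = 0))]
    rw [getD_map_nil o _ y hy]
    apply List.map_congr_left
    intro v _
    have : v + ((mx + my : Nat) : Int) = v + (my : Int) + (mx : Int) := by push_cast; ring
    rw [this]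

theorem alt_eq_build (o : List (List Int)) (limit lowest : Int) (nx ny : Int)
    (hnx : 1 ≤ nx) (hny : 1 ≤ ny) :
    extend_matrix_alt o nx ny limit lowest = build o limit lowest nx.toNat ny.toNat := by
  simp only [extend_matrix_alt]
  rw [if_neg (by push_neg; constructor <;> omega)]
  rw [tiles_eq o limit lowest (nx + ny - 1).toNat]
  have hstep : (fun (result : List (List Int)) (my : Nat) =>
      (List.range o.length).foldl (fun result y =>
        result ++ [(List.range nx.toNat).foldl
          (fun row mx => row ++ (((List.range (nx + ny - 1).toNat).map (tileFn o limit lowest)).getD (mx + my) []).getD y []) []]) result)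
      = (fun (result : List (List Int)) (my : Nat) =>
          result ++ (List.range o.length).map (fun y =>
            (List.range nx.toNat).foldl
              (fun row mx => row ++ (((List.range (nx + ny - 1).toNat).map (tileFn o limit lowest)).getD (mx + my) []).getD y []) [])) := by
    funext result my
    exact foldl_snoc_f _ (List.range o.length) result
  rw [hstep, foldl_app_f _ (List.range ny.toNat) [], List.nil_append]
  unfold build blk
  apply flatMap_congr_mem
  intro my hmy
  rw [List.mem_range] at hmy
  apply List.map_congr_left
  intro y hy
  rw [List.mem_range] at hy
  rw [foldl_app_f _ (List.range nx.toNat) [], List.nil_append]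
  apply flatMap_congr_mem
  intro mx hmx
  rw [List.mem_range] at hmx
  have hlt : mx + my < (nx + ny - 1).toNat := by omega
  rw [PySem.List.getD_map_range (tileFn o limit lowest) (nx + ny - 1).toNat (mx + my) [] hlt]
  exact tile_row o limit lowest my mx y hy

-- ===== VERDICT =====
theorem extend_matrix_spec : Claim_equal_extend_matrix := by
  intro o nx ny limit lowest _hdom hpre
  obtain ⟨hne, hcase⟩ := hpre
  unfold Spec_extend_matrix
  by_cases htriv : nx ≤ 0 ∨ ny ≤ 0
  · unfold extend_matrix extend_matrix_alt
    rw [if_pos htriv]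
    rcases htriv with h | h
    · rw [PySem.List.pyRange_one_eq_nil h]
      simp only [List.foldl_nil]
      rw [clone_2d_eq, foldl_snoc o []]
      simp
    · rw [PySem.List.pyRange_one_eq_nil h]
      simp only [List.foldl_nil]
      rw [foldl_id, clone_2d_eq, foldl_snoc o []]
      simp
  · push_neg at htriv
    obtain ⟨hnx, hny⟩ := htriv
    have hrect : ∀ r ∈ o, r.length = (o.headD []).length := by
      rcases hcase with h | h | ⟨h, _⟩
      · omega
      · omega
      · exact h
    rw [alt_eq_build o limit lowest nx ny (by omega) (by omega)]
    unfold extend_matrix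
    rw [pyGet0 o hne, pyRange_toNat nx (by omega), pyRange_toNat ny (by omega)]
    simp only [List.foldl_map]
    exact tiling o limit lowest hrect ny.toNat (by omega) nx.toNat (by omega)
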